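-- pv_equiv track=rewrite | github.com/raghotham/sabre | sabre/server/helpers/semantic_database.py | _analyze_sample_data
-- ===== SOURCE A (Python) =====
-- from typing import List, Optional
--
-- def _analyze_sample_data(columns: List, sample_rows: List) -> str:
--     """Analyze sample data to provide insights"""
--     if not sample_rows:
--         return "No sample data available"
--
--     analysis = f"Sample of {len(sample_rows)} rows:\n"
--     col_names = [col[1] for col in columns]
--
--     # Look for patterns in the data
--     for i, col_name in enumerate(col_names):
--         values = [str(row[i]) if row[i] is not None else "NULL" for row in sample_rows]
--         unique_values = len(set(values))
--
--         if unique_values == 1: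
--             analysis += f"  - {col_name}: Constant value ({values[0]})\n"
--         elif unique_values == len(values):
--             analysis += f"  - {col_name}: All unique values\n"
--         else:
--             analysis += f"  - {col_name}: {unique_values} unique values out of {len(values)}\n"
--
--     return analysis
-- ===== SOURCE B (Python) =====
-- def _analyze_sample_data(columns, sample_rows):
--     """Analyze sample data to provide insights"""
--     if not sample_rows:
--         return "No sample data available"
--
--     # one pass over the rows: per column keep the set of seen values and the first value
--     state = [[set(), None] for _ in columns]
--     for row in sample_rows:
--         for i, st in enumerate(state):
--             v = str(row[i]) if row[i] is not None else "NULL"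
--             st[0].add(v)
--             if st[1] is None:
--                 st[1] = v
--
--     total = len(sample_rows)
--     out = f"Sample of {total} rows:\n"
--     for col, (seen, first) in zip(columns, state):
--         u = len(seen)
--         if u == 1:
--             out += f"  - {col[1]}: Constant value ({first})\n"
--         elif u == total:
--             out += f"  - {col[1]}: All unique values\n"
--         else:
--             out += f"  - {col[1]}: {u} unique values out of {total}\n"
--     return out
-- ===== Notes on version B (the rewrite author's own statement) =====
-- stated objective: alternative
-- what changed: A rescans all sample_rows once per column (building each column's value list inside the column loop); B makes a single pass over the rows maintaining, per column, a set of seen values and the first value, then renders the summary from that state.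
import Mathlib
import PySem

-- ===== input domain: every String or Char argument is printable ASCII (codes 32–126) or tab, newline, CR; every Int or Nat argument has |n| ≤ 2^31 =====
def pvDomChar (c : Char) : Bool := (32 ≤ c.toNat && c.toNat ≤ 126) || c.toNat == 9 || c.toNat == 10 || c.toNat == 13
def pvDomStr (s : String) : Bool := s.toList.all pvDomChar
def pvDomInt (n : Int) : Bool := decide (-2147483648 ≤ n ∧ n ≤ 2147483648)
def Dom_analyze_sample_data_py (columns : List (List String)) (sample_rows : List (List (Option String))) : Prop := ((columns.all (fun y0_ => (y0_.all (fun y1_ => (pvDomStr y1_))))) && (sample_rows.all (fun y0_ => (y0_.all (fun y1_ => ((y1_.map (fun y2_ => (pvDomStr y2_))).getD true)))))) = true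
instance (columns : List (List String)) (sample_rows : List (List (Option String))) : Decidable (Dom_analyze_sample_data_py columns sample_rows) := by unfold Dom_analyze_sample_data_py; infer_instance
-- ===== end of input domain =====

-- B replaces A's per-column scans over all rows (re-building each column's value list) by a single
-- pass over the rows that maintains, per column, the set of seen values and the first value
-- (objective: alternative decomposition, same asymptotic cost).

-- ===== PORT A =====
-- str(row[i]) if row[i] is not None else "NULL"
def pvCellA (c : Option String) : String :=
  match c with
  | some s => s
  | none => "NULL"

def analyze_sample_data_py (columns : List (List String)) (sample_rows : List (List (Option String))) : String :=
  if sample_rows = [] then "No sample data available"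
  else
    let analysis := "Sample of " ++ PySem.Int.toStr (PySem.List.len sample_rows) ++ " rows:\n"
    let col_names := columns.map (fun col => PySem.List.pyGetD col 1 "")
    (PySem.List.enumerate col_names 0).foldl
      (fun analysis p =>
        let values := sample_rows.map (fun row => pvCellA (PySem.List.pyGetD row p.1 none))
        let unique_values := PySem.Set.len (PySem.Set.ofList values)
        if unique_values = 1 then
          analysis ++ "  - " ++ p.2 ++ ": Constant value (" ++ PySem.List.pyGetD values 0 "" ++ ")\n"
        else if unique_values = PySem.List.len values then
          analysis ++ "  - " ++ p.2 ++ ": All unique values\n"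
        else
          analysis ++ "  - " ++ p.2 ++ ": " ++ PySem.Int.toStr unique_values ++
            " unique values out of " ++ PySem.Int.toStr (PySem.List.len values) ++ "\n")
      analysis

-- ===== PORT B =====
def pvCellB (c : Option String) : String :=
  match c with
  | some s => s
  | none => "NULL"

-- one row of B's single pass: update every column's (seen-set, first-value) pair
def pvStepB (st : List (PySem.Set String × Option String)) (row : List (Option String)) :
    List (PySem.Set String × Option String) :=
  (PySem.List.enumerate st 0).map (fun p =>
    let v := pvCellB (PySem.List.pyGetD row p.1 none)
    (PySem.Set.add p.2.1 v, match p.2.2 with | none => some v | some f => some f))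

def analyze_sample_data_py_alt (columns : List (List String)) (sample_rows : List (List (Option String))) : String :=
  if sample_rows = [] then "No sample data available"
  else
    let st := sample_rows.foldl pvStepB
      (columns.map (fun _ => ((PySem.Set.empty : PySem.Set String), (none : Option String))))
    let total := PySem.List.len sample_rows
    (columns.zip st).foldl
      (fun out q =>
        let u := PySem.Set.len q.2.1
        if u = 1 then
          out ++ "  - " ++ PySem.List.pyGetD q.1 1 "" ++ ": Constant value (" ++ (q.2.2).getD "None" ++ ")\n"
        else if u = total then
          out ++ "  - " ++ PySem.List.pyGetD q.1 1 "" ++ ": All unique values\n"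
        else
          out ++ "  - " ++ PySem.List.pyGetD q.1 1 "" ++ ": " ++ PySem.Int.toStr u ++
            " unique values out of " ++ PySem.Int.toStr total ++ "\n")
      ("Sample of " ++ PySem.Int.toStr total ++ " rows:\n")

-- ===== PRECONDITION & SPEC =====
-- Pre_ excludes exactly the inputs where Python A raises: with nonempty sample_rows, `col[1]`
-- needs every column entry to have length ≥ 2 and `row[i]` needs every row to be at least as
-- long as `columns` (IndexError otherwise).
def Pre_analyze_sample_data_py (columns : List (List String)) (sample_rows : List (List (Option String))) : Prop :=
  sample_rows = [] ∨
    ((∀ col ∈ columns, 2 ≤ col.length) ∧ (∀ row ∈ sample_rows, columns.length ≤ row.length))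
instance (columns : List (List String)) (sample_rows : List (List (Option String))) : Decidable (Pre_analyze_sample_data_py columns sample_rows) := by unfold Pre_analyze_sample_data_py; infer_instance

def pvWitness_analyze_sample_data_py : List (List String) × List (List (Option String)) :=
  ([["id", "name"]], [[some "a"], [some "b"]])

def Spec_analyze_sample_data_py (columns : List (List String)) (sample_rows : List (List (Option String))) (out : String) : Prop := out = analyze_sample_data_py_alt columns sample_rows
instance (columns : List (List String)) (sample_rows : List (List (Option String))) (out : String) : Decidable (Spec_analyze_sample_data_py columns sample_rows out) := by unfold Spec_analyze_sample_data_py; infer_instance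

-- ===== CLAIM (what is proved, stated in full; the proofs are below) =====
def Claim_equal_analyze_sample_data_py : Prop := ∀ (columns : List (List String)) (sample_rows : List (List (Option String))), Dom_analyze_sample_data_py columns sample_rows → Pre_analyze_sample_data_py columns sample_rows → Spec_analyze_sample_data_py columns sample_rows (analyze_sample_data_py columns sample_rows)

-- ===== LEMMAS AND PROOFS =====

-- the stringified cell of row at column i (both ports compute this value)
def pvVal (i : Int) (row : List (Option String)) : String :=
  pvCellA (PySem.List.pyGetD row i none)

-- first-value accumulator of B's pass, expressed over the whole value list
def pvFirst (o : Option String) (vs : List String) : Option String :=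
  match o with | some x => some x | none => vs.head?

lemma pvCellB_eq_pvCellA : pvCellB = pvCellA := rfl

-- one step of B's pass on a state presented as a map over range
lemma pvStepB_map_range (row : List (Option String)) (n : Nat)
    (f : Nat → PySem.Set String × Option String) :
    pvStepB ((List.range n).map f) row
      = (List.range n).map (fun i =>
          (PySem.Set.add (f i).1 (pvVal (i : Int) row),
           match (f i).2 with
           | none => some (pvVal (i : Int) row)
           | some x => some x)) := by
  unfold pvStepB
  apply List.ext_getElem
  · simp [PySem.List.length_enumerate]
  · intro k h1 h2
    simp only [List.getElem_map, List.getElem_range]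
    rw [PySem.List.getElem_enumerate]
    simp [pvCellB_eq_pvCellA, pvVal]

-- B's whole pass, by induction over the rows
lemma foldl_pvStepB (rows : List (List (Option String))) (n : Nat)
    (f : Nat → PySem.Set String × Option String) :
    rows.foldl pvStepB ((List.range n).map f)
      = (List.range n).map (fun i =>
          (PySem.Set.update (f i).1 (rows.map (pvVal (i : Int))),
           pvFirst (f i).2 (rows.map (pvVal (i : Int))))) := by
  induction rows generalizing f with
  | nil =>
    apply List.ext_getElem
    · simp
    · intro k h1 h2
      simp only [List.getElem_map, List.getElem_range, List.map_nil]
      rcases hf : f k with ⟨s, o⟩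
      cases o <;> simp [PySem.Set.update, pvFirst, hf]
  | cons r rs ih =>
    simp only [List.foldl_cons]
    rw [pvStepB_map_range, ih]
    apply List.ext_getElem
    · simp
    · intro k h1 h2
      simp only [List.getElem_map, List.getElem_range, List.map_cons]
      rcases hf : f k with ⟨s, o⟩
      cases o <;> simp [PySem.Set.update_cons, pvFirst]

-- A's per-column line, with the appends right-associated
def pvLine (name : String) (values : List String) : String :=
  let u := PySem.Set.len (PySem.Set.ofList values)
  if u = 1 then
    "  - " ++ (name ++ (": Constant value (" ++ (PySem.List.pyGetD values 0 "" ++ ")\n")))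
  else if u = PySem.List.len values then
    "  - " ++ (name ++ ": All unique values\n")
  else
    "  - " ++ (name ++ (": " ++ (PySem.Int.toStr u ++ (" unique values out of " ++
      (PySem.Int.toStr (PySem.List.len values) ++ "\n")))))

-- B's per-column line, with the appends right-associated
def pvLineB (total : Int) (q : List String × (PySem.Set String × Option String)) : String :=
  let u := PySem.Set.len q.2.1
  if u = 1 then
    "  - " ++ (PySem.List.pyGetD q.1 1 "" ++ (": Constant value (" ++ ((q.2.2).getD "None" ++ ")\n")))
  else if u = total then
    "  - " ++ (PySem.List.pyGetD q.1 1 "" ++ ": All unique values\n")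
  else
    "  - " ++ (PySem.List.pyGetD q.1 1 "" ++ (": " ++ (PySem.Int.toStr u ++ (" unique values out of " ++
      (PySem.Int.toStr total ++ "\n")))))

-- folds that append one chunk per element agree when the chunk lists agree
lemma pvFoldlAppendCongr {α β : Type} (F : String → α → String) (G : String → β → String)
    (f : α → String) (g : β → String)
    (hF : ∀ a x, F a x = a ++ f x) (hG : ∀ a y, G a y = a ++ g y) :
    ∀ (xs : List α) (ys : List β), xs.map f = ys.map g →
      ∀ a : String, xs.foldl F a = ys.foldl G a := by
  intro xs
  induction xs with
  | nil =>
    intro ys hmap a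
    cases ys with
    | nil => rfl
    | cons y ys => simp at hmap
  | cons x xs ih =>
    intro ys hmap a
    cases ys with
    | nil => simp at hmap
    | cons y ys =>
      simp only [List.map_cons, List.cons.injEq] at hmap
      simp only [List.foldl_cons, hF, hG, hmap.1]
      exact ih ys hmap.2 _

-- the two line builders agree on a nonempty value list
lemma pvLine_eq_pvLineB (c : List String) (vs : List String) (hvs : vs ≠ []) (total : Int)
    (htot : PySem.List.len vs = total) :
    pvLine (PySem.List.pyGetD c 1 "") vs = pvLineB total (c, (PySem.Set.ofList vs, vs.head?)) := by
  cases vs with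
  | nil => exact absurd rfl hvs
  | cons v vs' =>
    simp only [pvLine, pvLineB]
    rw [← htot]
    split_ifs <;> simp [PySem.List.pyGetD_zero_cons]

lemma pv_main (columns : List (List String)) (sample_rows : List (List (Option String)))
    (h : sample_rows ≠ []) :
    analyze_sample_data_py columns sample_rows = analyze_sample_data_py_alt columns sample_rows := by
  unfold analyze_sample_data_py analyze_sample_data_py_alt
  rw [if_neg h, if_neg h]
  have hinit : columns.map (fun _ => ((PySem.Set.empty : PySem.Set String), (none : Option String)))
      = (List.range columns.length).map
          (fun _ => ((PySem.Set.empty : PySem.Set String), (none : Option String))) := by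
    simp [List.map_const']
  rw [hinit, foldl_pvStepB]
  apply pvFoldlAppendCongr _ _
    (fun p : Int × String => pvLine p.2 (sample_rows.map (fun row => pvCellA (PySem.List.pyGetD row p.1 none))))
    (pvLineB (PySem.List.len sample_rows))
  · intro a p
    simp only [pvLine]
    split_ifs <;> simp [String.append_assoc]
  · intro a q
    simp only [pvLineB]
    split_ifs <;> simp [String.append_assoc]
  · apply List.ext_getElem
    · simp [PySem.List.length_enumerate]
    · intro k h1 h2
      simp only [List.getElem_map, List.getElem_zip, List.getElem_range]
      rw [PySem.List.getElem_enumerate]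
      simp only [List.getElem_map, zero_add]
      rw [pvLine_eq_pvLineB _ _ (by simp [h]) _ rfl]
      congr 1
      simp

-- ===== VERDICT (by name: the statement is the Claim_ definition above) =====
theorem analyze_sample_data_py_spec : Claim_equal_analyze_sample_data_py := by
  intro columns sample_rows _hdom _hpre
  unfold Spec_analyze_sample_data_py
  by_cases h : sample_rows = []
  · simp [analyze_sample_data_py, analyze_sample_data_py_alt, h]
  · exact pv_main columns sample_rows h
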